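-- pv_equiv track=rewrite | github.com/jovermann/dataplot | dataplot.py | calcHistogram
-- ===== SOURCE A (Python) =====
-- def calcHistogram(yy, binsize):
--     """Calculate histogram of yy values.
--     Return (xx, yy) where xx is the start of each bin and yy the number of items in the bin.
--     """
--     hist = {}
--     for y in yy:
--         bin = y // binsize
--         if bin in hist:
--             hist[bin] += 1
--         else:
--             hist[bin] = 1
--     xxout = []
--     yyout = []
--     for key, value in sorted(hist.items()):
--         xxout.append(key * binsize)
--         yyout.append(value)
--     return (xxout, yyout)
-- ===== SOURCE B (Python) =====
-- def calcHistogram(yy, binsize):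
--     """Calculate histogram of yy values.
--     Sort-then-group: sort the computed bins once, then one run-length sweep
--     over consecutive equal bins (no dict, no key sort).
--     """
--     bins = sorted(y // binsize for y in yy)
--     xxout = []
--     yyout = []
--     i = 0
--     n = len(bins)
--     while i < n:
--         j = i + 1
--         while j < n and bins[j] == bins[i]:
--             j += 1
--         xxout.append(bins[i] * binsize)
--         yyout.append(j - i)
--         i = j
--     return (xxout, yyout)
-- ===== Notes on version B (the rewrite author's own statement) =====
-- stated objective: alternative
-- what changed: Replaces A's dict-count-then-sorted-items strategy by sorting the computed bins once and doing a single run-length sweep over consecutive equal bins.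
import Mathlib
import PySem

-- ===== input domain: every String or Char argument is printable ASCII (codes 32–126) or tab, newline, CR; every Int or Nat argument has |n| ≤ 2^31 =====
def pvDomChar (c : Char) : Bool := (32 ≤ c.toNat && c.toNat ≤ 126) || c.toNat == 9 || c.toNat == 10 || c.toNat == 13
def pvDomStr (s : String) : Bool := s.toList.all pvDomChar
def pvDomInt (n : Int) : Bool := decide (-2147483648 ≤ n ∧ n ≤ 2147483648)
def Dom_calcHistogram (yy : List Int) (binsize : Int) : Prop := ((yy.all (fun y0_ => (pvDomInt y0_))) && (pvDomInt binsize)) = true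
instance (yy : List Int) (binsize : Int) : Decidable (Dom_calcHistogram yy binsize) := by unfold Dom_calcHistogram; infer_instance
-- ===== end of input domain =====

-- B sorts the computed bins once and does one run-length sweep over consecutive equal
-- bins instead of A's dict counting followed by sorting the items.

-- ===== PORT A =====
def calcHistogram (yy : List Int) (binsize : Int) : List Int × List Int :=
  let hist := yy.foldl (fun hist y =>
      let bin := PySem.Int.floordiv y binsize
      if hist.contains bin then hist.modify bin 0 (· + 1) else hist.insert bin 1)
    PySem.Dict.empty
  let sortedItems := PySem.List.sorted2 hist.items (fun p => p.1) (fun p => p.2)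
  sortedItems.foldl (fun acc p => (acc.1 ++ [p.1 * binsize], acc.2 ++ [p.2]))
    (([] : List Int), ([] : List Int))

-- ===== PORT B =====
-- the outer while of Source B is this recursion; the inner while advancing j is takeWhile/dropWhile on the tail
def histRuns (binsize : Int) : List Int → List Int × List Int
  | [] => ([], [])
  | b :: t =>
    let rest := t.dropWhile (fun y => y == b)
    let r := histRuns binsize rest
    (b * binsize :: r.1, (((t.takeWhile (fun y => y == b)).length : Int) + 1) :: r.2)
termination_by s => s.length
decreasing_by
  have := List.length_dropWhile_le (fun y => y == b) t
  simp only [List.length_cons]; omega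

def calcHistogram_alt (yy : List Int) (binsize : Int) : List Int × List Int :=
  histRuns binsize
    (PySem.List.sorted (yy.map (fun y => PySem.Int.floordiv y binsize)) (fun b => b) false)

-- ===== PRECONDITION & SPEC =====
-- Pre_ excludes exactly the inputs where A raises ZeroDivisionError: binsize = 0 with yy nonempty.
def Pre_calcHistogram (yy : List Int) (binsize : Int) : Prop := yy = [] ∨ binsize ≠ 0
instance (yy : List Int) (binsize : Int) : Decidable (Pre_calcHistogram yy binsize) := by unfold Pre_calcHistogram; infer_instance
def pvWitness_calcHistogram : List Int × Int := ([5, -3, 4, 5, 0], 2)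

def Spec_calcHistogram (yy : List Int) (binsize : Int) (out : List Int × List Int) : Prop := out = calcHistogram_alt yy binsize
instance (yy : List Int) (binsize : Int) (out : List Int × List Int) : Decidable (Spec_calcHistogram yy binsize out) := by unfold Spec_calcHistogram; infer_instance

-- ===== CLAIM (what is proved, stated in full; the proofs are below) =====
def Claim_equal_calcHistogram : Prop := ∀ (yy : List Int) (binsize : Int), Dom_calcHistogram yy binsize → Pre_calcHistogram yy binsize → Spec_calcHistogram yy binsize (calcHistogram yy binsize)

-- ===== LEMMAS AND PROOFS =====

lemma insertBy_congr {α : Type} (b1 b2 : α → α → Bool) (x : α) (ys : List α)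
    (h : ∀ y ∈ ys, b1 x y = b2 x y) :
    PySem.List.insertBy b1 x ys = PySem.List.insertBy b2 x ys := by
  induction ys with
  | nil => rfl
  | cons y ys ih =>
    simp only [PySem.List.insertBy, h y (by simp)]
    split
    · rfl
    · simp only [List.cons.injEq, true_and]
      exact ih (fun z hz => h z (by simp [hz]))

lemma foldl_insertBy_congr {α : Type} (b1 b2 : α → α → Bool) (S : List α)
    (h : ∀ a ∈ S, ∀ c ∈ S, b1 a c = b2 a c) :
    ∀ (l acc : List α), (∀ a ∈ l, a ∈ S) → (∀ a ∈ acc, a ∈ S) →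
      l.foldl (fun acc x => PySem.List.insertBy b1 x acc) acc
        = l.foldl (fun acc x => PySem.List.insertBy b2 x acc) acc := by
  intro l
  induction l with
  | nil => intro acc _ _; rfl
  | cons x l ih =>
    intro acc hl hacc
    have hx : x ∈ S := hl x (by simp)
    have hstep : PySem.List.insertBy b1 x acc = PySem.List.insertBy b2 x acc :=
      insertBy_congr b1 b2 x acc (fun y hy => h x hx y (hacc y hy))
    simp only [List.foldl_cons, hstep]
    refine ih _ (fun a ha => hl a (by simp [ha])) ?_
    intro a ha
    rcases (PySem.List.mem_insertBy b2 x a acc).mp ha with rfl | ha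
    · exact hx
    · exact hacc a ha

lemma sorted2_fst (xs : List (Int × Int))
    (hx : ∀ a ∈ xs, ∀ c ∈ xs, a ≠ c → a.1 ≠ c.1) :
    PySem.List.sorted2 xs (fun p => p.1) (fun p => p.2) false
      = PySem.List.sorted xs (fun p => p.1) false := by
  simp only [PySem.List.sorted2, PySem.List.sorted, if_neg (by decide : ¬ (false = true))]
  apply foldl_insertBy_congr _ _ xs _ xs [] (fun a ha => ha) (by simp)
  intro a ha c hc
  by_cases hac : a = c
  · subst hac; simp
  · have hne := hx a ha c hc hac
    rcases lt_trichotomy a.1 c.1 with hlt | heq | hgt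
    · simp [hlt, not_lt.mpr hlt.le]
    · exact absurd heq hne
    · simp [hgt, not_lt.mpr hgt.le]

-- A's counting loop builds Counter(bins)
lemma hist_eq_counter (yy : List Int) (binsize : Int) :
    yy.foldl (fun hist y =>
      let bin := PySem.Int.floordiv y binsize
      if hist.contains bin then hist.modify bin 0 (· + 1) else hist.insert bin 1)
      PySem.Dict.empty
    = PySem.Dict.counter (yy.map (fun y => PySem.Int.floordiv y binsize)) := by
  rw [PySem.Dict.counter_eq_foldl, List.foldl_map]
  apply List.foldl_ext
  intro d y _
  by_cases h : d.contains (PySem.Int.floordiv y binsize) = true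
  · simp [h, PySem.Dict.modify]
  · have h0 : d.getD (PySem.Int.floordiv y binsize) 0 = 0 :=
      PySem.Dict.getD_of_not_contains d 0 (by simpa using h)
    simp [h, PySem.Dict.modify, h0]

-- characterisation of A's value
lemma calcHistogram_eq (yy : List Int) (binsize : Int) :
    calcHistogram yy binsize
      = ((PySem.List.sorted (PySem.Set.ofList (yy.map (fun y => PySem.Int.floordiv y binsize))) (fun x => x) false).map (· * binsize),
         (PySem.List.sorted (PySem.Set.ofList (yy.map (fun y => PySem.Int.floordiv y binsize))) (fun x => x) false).map
           (fun k => ((yy.map (fun y => PySem.Int.floordiv y binsize)).count k : Int))) := by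
  have hnodup := PySem.Set.nodup_ofList (yy.map (fun y => PySem.Int.floordiv y binsize))
  have hsort2 : PySem.List.sorted2
        ((PySem.Set.ofList (yy.map (fun y => PySem.Int.floordiv y binsize))).map
          (fun k => (k, ((yy.map (fun y => PySem.Int.floordiv y binsize)).count k : Int))))
        (fun p => p.1) (fun p => p.2) false
      = (PySem.List.sorted (PySem.Set.ofList (yy.map (fun y => PySem.Int.floordiv y binsize))) (fun x => x) false).map
          (fun k => (k, ((yy.map (fun y => PySem.Int.floordiv y binsize)).count k : Int))) := by
    rw [sorted2_fst]
    · exact PySem.List.sorted_eq_of_perm_of_pairwise_lt _ _ _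
        ((PySem.List.sorted_perm (PySem.Set.ofList (yy.map (fun y => PySem.Int.floordiv y binsize))) (fun x => x) false).map _)
        (by
          rw [List.pairwise_map]
          exact PySem.List.sorted_ofList_pairwise_lt (yy.map (fun y => PySem.Int.floordiv y binsize)))
    · intro a ha c hc hne
      simp only [List.mem_map] at ha hc
      obtain ⟨ka, hka, rfl⟩ := ha
      obtain ⟨kc, hkc, rfl⟩ := hc
      simp only [ne_eq]
      intro hfst
      exact hne (by simp [hfst])
  simp only [calcHistogram]
  rw [hist_eq_counter, PySem.Dict.items_counter, hsort2]
  rw [PySem.List.foldl_prod_mk (fun l (p : Int × Int) => l ++ [p.1 * binsize])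
        (fun l (p : Int × Int) => l ++ [p.2])]
  rw [PySem.List.foldl_append_singleton_eq_map (fun p : Int × Int => p.1 * binsize),
      PySem.List.foldl_append_singleton_eq_map (fun p : Int × Int => p.2)]
  simp [List.map_map, Function.comp_def]

-- B's sweep over a ≤-sorted list produces the distinct bins (strictly increasing) with their counts
lemma dropWhile_head_false {α : Type} (p : α → Bool) :
    ∀ (l : List α) {y0 : α} {r : List α}, l.dropWhile p = y0 :: r → p y0 = false := by
  intro l
  induction l with
  | nil => intro y0 r h; simp at h
  | cons a l ih =>
    intro y0 r h
    by_cases hp : p a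
    · rw [List.dropWhile_cons_of_pos hp] at h
      exact ih h
    · rw [List.dropWhile_cons_of_neg hp] at h
      cases h
      simpa using hp

lemma histRuns_spec (binsize : Int) : ∀ (n : Nat) (s : List Int), s.length ≤ n → s.Pairwise (· ≤ ·) →
    ∃ D : List Int, (∀ x, x ∈ D ↔ x ∈ s) ∧ D.Pairwise (· < ·) ∧
      histRuns binsize s = (D.map (· * binsize), D.map (fun k => (s.count k : Int))) := by
  intro n
  induction n with
  | zero =>
    intro s hlen _
    have hs : s = [] := List.eq_nil_of_length_eq_zero (Nat.le_zero.mp hlen)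
    subst hs
    exact ⟨[], by simp, by simp, by rw [histRuns]; simp⟩
  | succ n ih =>
    intro s hlen hs
    match s, hs with
    | [], _ => exact ⟨[], by simp, by simp, by rw [histRuns]; simp⟩
    | b :: t, hs =>
      have ht : t.Pairwise (· ≤ ·) := hs.of_cons
      have hble : ∀ y ∈ t, b ≤ y := fun y hy => List.rel_of_pairwise_cons hs hy
      have hrest_sub : (t.dropWhile (fun y => y == b)).Sublist t := List.dropWhile_sublist _
      have hrest_pw : (t.dropWhile (fun y => y == b)).Pairwise (· ≤ ·) := ht.sublist hrest_sub
      have hrest_lt : ∀ y ∈ t.dropWhile (fun y => y == b), b < y := by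
        intro y hy
        rcases eq_or_lt_of_le (hble y (hrest_sub.mem hy)) with heq | hlt
        · exfalso
          rcases hrest : t.dropWhile (fun y => y == b) with _ | ⟨y0, rest'⟩
          · rw [hrest] at hy; simp at hy
          · have hy0b : y0 ≠ b := by
              simpa using dropWhile_head_false (fun y => y == b) t hrest
            have hy0le : b ≤ y0 := hble y0 (hrest_sub.mem (by rw [hrest]; simp))
            rw [hrest] at hy
            rcases List.mem_cons.mp hy with rfl | hy'
            · exact hy0b heq.symm
            · have hle : y0 ≤ y := by
                rw [hrest] at hrest_pw
                exact List.rel_of_pairwise_cons hrest_pw hy'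
              exact hy0b (le_antisymm (heq ▸ hle) hy0le)
        · exact hlt
      have hlen' : (t.dropWhile (fun y => y == b)).length ≤ n := by
        have h1 := List.length_dropWhile_le (fun y => y == b) t
        simp only [List.length_cons] at hlen
        omega
      obtain ⟨D, hDmem, hDpw, hDeq⟩ := ih (t.dropWhile (fun y => y == b)) hlen' hrest_pw
      have hsplit : t = t.takeWhile (fun y => y == b) ++ t.dropWhile (fun y => y == b) :=
        (List.takeWhile_append_dropWhile).symm
      refine ⟨b :: D, ?_, ?_, ?_⟩
      · intro x
        constructor
        · intro hx
          rcases List.mem_cons.mp hx with rfl | hx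
          · simp
          · exact List.mem_cons_of_mem _ (hrest_sub.mem ((hDmem x).mp hx))
        · intro hx
          rcases List.mem_cons.mp hx with rfl | hx
          · simp
          · have hx' : x ∈ t.takeWhile (fun y => y == b) ∨ x ∈ t.dropWhile (fun y => y == b) := by
              rw [← List.mem_append, List.takeWhile_append_dropWhile]
              exact hx
            rcases hx' with h | h
            · have := List.mem_takeWhile_imp h
              simp only [beq_iff_eq] at this
              simp [this]
            · exact List.mem_cons_of_mem _ ((hDmem x).mpr h)
      · exact List.pairwise_cons.mpr ⟨fun y hy => hrest_lt y ((hDmem y).mp hy), hDpw⟩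
      · have hcount_b : (b :: t).count b
            = (t.takeWhile (fun y => y == b)).length + 1 := by
          have h1 : (t.takeWhile (fun y => y == b)).count b = (t.takeWhile (fun y => y == b)).length :=
            List.count_eq_length.mpr (fun y hy =>
              ((by simpa using List.mem_takeWhile_imp hy : y = b)).symm)
          have h2 : (t.dropWhile (fun y => y == b)).count b = 0 :=
            List.count_eq_zero.mpr (fun hb => lt_irrefl b (hrest_lt b hb))
          rw [List.count_cons_self]
          conv_lhs => rw [hsplit]
          rw [List.count_append, h1, h2]
        have hcount_rest : ∀ k ∈ D,
            (t.dropWhile (fun y => y == b)).count k = (b :: t).count k := by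
          intro k hk
          have hkb : b < k := hrest_lt k ((hDmem k).mp hk)
          have hkne : b ≠ k := ne_of_lt hkb
          have h1 : (t.takeWhile (fun y => y == b)).count k = 0 :=
            List.count_eq_zero.mpr (fun hkm => by
              have := List.mem_takeWhile_imp hkm
              simp only [beq_iff_eq] at this
              exact hkne this.symm)
          rw [List.count_cons_of_ne hkne]
          conv_rhs => rw [hsplit]
          rw [List.count_append, h1]
          simp
        rw [histRuns, hDeq]
        refine Prod.ext rfl ?_
        simp only [List.map_cons]
        congr 1
        · rw [hcount_b]
          push_cast
          ring
        · exact List.map_congr_left (fun k hk => by rw [hcount_rest k hk])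

-- characterisation of B's value: the same pair
lemma calcHistogram_alt_eq (yy : List Int) (binsize : Int) :
    calcHistogram_alt yy binsize
      = ((PySem.List.sorted (PySem.Set.ofList (yy.map (fun y => PySem.Int.floordiv y binsize))) (fun x => x) false).map (· * binsize),
         (PySem.List.sorted (PySem.Set.ofList (yy.map (fun y => PySem.Int.floordiv y binsize))) (fun x => x) false).map
           (fun k => ((yy.map (fun y => PySem.Int.floordiv y binsize)).count k : Int))) := by
  set bins := yy.map (fun y => PySem.Int.floordiv y binsize) with hbins
  have hperm : (PySem.List.sorted bins (fun b => b) false).Perm bins :=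
    PySem.List.sorted_perm bins (fun b => b) false
  have hpw : (PySem.List.sorted bins (fun b => b) false).Pairwise (· ≤ ·) :=
    PySem.List.sorted_pairwise bins (fun b => b)
  obtain ⟨D, hDmem, hDpw, hDeq⟩ :=
    histRuns_spec binsize (PySem.List.sorted bins (fun b => b) false).length
      (PySem.List.sorted bins (fun b => b) false) le_rfl hpw
  have hDnodup : D.Nodup := hDpw.imp ne_of_lt
  have hDperm : D.Perm (PySem.Set.ofList bins) := by
    refine (List.perm_ext_iff_of_nodup hDnodup (PySem.Set.nodup_ofList bins)).mpr ?_
    intro x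
    rw [hDmem x, PySem.Set.mem_ofList]
    exact hperm.mem_iff
  have hKD : PySem.List.sorted (PySem.Set.ofList bins) (fun x => x) false = D :=
    PySem.List.sorted_eq_of_perm_of_pairwise_lt _ _ _ hDperm hDpw
  show histRuns binsize (PySem.List.sorted bins (fun b => b) false) = _
  rw [hDeq, hKD]
  refine Prod.ext rfl ?_
  exact List.map_congr_left (fun k _ => by rw [hperm.count_eq])

-- ===== VERDICT (by name: the statement is the Claim_ definition above) =====
theorem calcHistogram_spec : Claim_equal_calcHistogram := by
  intro yy binsize _ _
  unfold Spec_calcHistogram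
  rw [calcHistogram_eq, calcHistogram_alt_eq]
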